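-- pv_equiv track=rewrite | github.com/cbell98/Helper_Functions | module9.py | solution
-- ===== SOURCE A (Python) =====
-- def solution(s, letters):
--
--     letter_count = {}
--
--     for c in s:
--         if c not in letter_count:
--             letter_count[c] = 0
--
--         letter_count[c] += 1
--
--     result = []
--
--     for c in letters:
--         if c in letter_count:
--             result.append(letter_count[c])
--         else:
--             result.append(0)
--
--     return result
-- ===== SOURCE B (Python) =====
-- def solution(s, letters):
--     # Different algorithm: sort s once, then answer each letter with two
--     # hand-written binary searches (bisect_left / bisect_right); the count
--     # is the width of the equal range.
--     t = sorted(s)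
--     n = len(t)
--     result = []
--     for c in letters:
--         lo, hi = 0, n
--         while lo < hi:
--             mid = (lo + hi) // 2
--             if t[mid] < c:
--                 lo = mid + 1
--             else:
--                 hi = mid
--         left = lo
--         lo, hi = 0, n
--         while lo < hi:
--             mid = (lo + hi) // 2
--             if c < t[mid]:
--                 hi = mid
--             else:
--                 lo = mid + 1
--         result.append(lo - left)
--     return result
-- ===== Notes on version B (the rewrite author's own statement) =====
-- stated objective: alternative
-- what changed: Replaces the frequency dict with sort-then-binary-search: B sorts s once and answers each letter as bisect_right minus bisect_left (hand-written binary searches) on the sorted list.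
import Mathlib
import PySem

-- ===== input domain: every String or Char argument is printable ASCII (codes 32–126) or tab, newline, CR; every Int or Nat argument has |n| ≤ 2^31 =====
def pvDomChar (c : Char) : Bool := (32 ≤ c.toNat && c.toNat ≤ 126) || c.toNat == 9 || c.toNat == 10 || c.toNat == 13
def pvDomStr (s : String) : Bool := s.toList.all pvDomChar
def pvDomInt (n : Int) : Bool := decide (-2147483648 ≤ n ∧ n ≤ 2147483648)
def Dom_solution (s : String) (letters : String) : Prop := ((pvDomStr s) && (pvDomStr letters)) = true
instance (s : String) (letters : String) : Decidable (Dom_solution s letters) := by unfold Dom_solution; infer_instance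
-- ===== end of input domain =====

-- B drops A's frequency dict for a different algorithm: sort s once, then answer each letter with two hand-written binary searches (equal-range width) — alternative, not faster.


-- ===== PORT A =====
def solution (s : String) (letters : String) : List Int :=
  let letter_count : PySem.Dict Char Int :=
    s.toList.foldl (fun d c =>
      let d1 := if d.contains c then d else d.insert c 0
      d1.insert c (d1.getD c 0 + 1)) PySem.Dict.empty
  letters.toList.foldl (fun result c =>
    if letter_count.contains c then result ++ [letter_count.getD c 0]
    else result ++ [(0 : Int)]) []

-- ===== PORT B =====
-- first while-loop of Source B (bisect_left); t[mid] is in range whenever lo < hi ≤ len t, so getD is exact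
def pvBLeft (t : List Char) (c : Char) (lo hi : Nat) : Nat :=
  if _h : lo < hi then
    let mid := (lo + hi) / 2
    if t.getD mid default < c then pvBLeft t c (mid + 1) hi
    else pvBLeft t c lo mid
  else lo
termination_by hi - lo
decreasing_by all_goals omega

-- second while-loop of Source B (bisect_right)
def pvBRight (t : List Char) (c : Char) (lo hi : Nat) : Nat :=
  if _h : lo < hi then
    let mid := (lo + hi) / 2
    if c < t.getD mid default then pvBRight t c lo mid
    else pvBRight t c (mid + 1) hi
  else lo
termination_by hi - lo
decreasing_by all_goals omega

def solution_alt (s : String) (letters : String) : List Int :=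
  let t := PySem.List.sorted s.toList (fun x => x) false
  let n := t.length
  letters.toList.foldl (fun result c =>
    let left := pvBLeft t c 0 n
    let lo := pvBRight t c 0 n
    result ++ [((lo : Int) - (left : Int))]) []

-- ===== PRECONDITION & SPEC =====
def Spec_solution (s : String) (letters : String) (out : List Int) : Prop := out = solution_alt s letters
instance (s : String) (letters : String) (out : List Int) : Decidable (Spec_solution s letters out) := by unfold Spec_solution; infer_instance

-- ===== CLAIM (what is proved, stated in full; the proofs are below) =====
def Claim_equal_solution : Prop := ∀ (s : String) (letters : String), Dom_solution s letters → Spec_solution s letters (solution s letters)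

-- ===== LEMMAS AND PROOFS =====

-- A's counting loop computes the occurrence count, whatever dict it starts from.
theorem solution_fold_getD (l : List Char) (d : PySem.Dict Char Int) (v : Char) :
    (l.foldl (fun d c =>
      let d1 := if d.contains c then d else d.insert c 0
      d1.insert c (d1.getD c 0 + 1)) d).getD v 0 = d.getD v 0 + l.count v := by
  induction l generalizing d with
  | nil => simp
  | cons c cs ih =>
    simp only [List.foldl_cons, ih, List.count_cons]
    by_cases hc : d.contains c = true
    · simp only [hc, if_true]
      by_cases hv : v = c
      · subst hv
        simp
        ring
      · simp [PySem.Dict.getD_insert, hv, beq_iff_eq, Ne.symm hv]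
    · simp only [hc, if_false, Bool.false_eq_true]
      by_cases hv : v = c
      · subst hv
        have hcf : d.contains v = false := by simpa using hc
        simp [PySem.Dict.getD_of_not_contains, hcf]
        ring
      · simp [PySem.Dict.getD_insert, hv, beq_iff_eq, Ne.symm hv]

-- The output loop appends one value per letter.
theorem solution_fold_append {α β : Type} (l : List α) (acc : List β) (f : α → β) :
    l.foldl (fun r c => r ++ [f c]) acc = acc ++ l.map f := by
  induction l generalizing acc with
  | nil => simp
  | cons c cs ih => simp [ih]

-- Binary-search invariant for pvBLeft on a nondecreasing list: the result is a
-- boundary for the predicate (· < c).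
theorem pvBLeft_inv (t : List Char) (c : Char) (hs : t.Pairwise (· ≤ ·)) :
    ∀ lo hi, lo ≤ hi → hi ≤ t.length →
    (∀ j (_ : j < t.length), j < lo → t[j] < c) →
    (∀ j (_ : j < t.length), hi ≤ j → ¬ t[j] < c) →
    pvBLeft t c lo hi ≤ t.length ∧
    (∀ j (_ : j < t.length), j < pvBLeft t c lo hi → t[j] < c) ∧
    (∀ j (_ : j < t.length), pvBLeft t c lo hi ≤ j → ¬ t[j] < c) := by
  have hmono : ∀ i j (hi : i < t.length) (hj : j < t.length), i ≤ j → t[i] ≤ t[j] := by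
    intro i j hi hj hij
    rcases Nat.lt_or_ge i j with h | h
    · exact (List.pairwise_iff_getElem.1 hs) i j hi hj h
    · have : i = j := by omega
      subst this; exact le_rfl
  intro lo hi
  induction h : hi - lo using Nat.strong_induction_on generalizing lo hi with
  | _ d ih =>
    intro hlohi hhi hlow hup
    rw [pvBLeft]
    by_cases hlt : lo < hi
    · simp only [hlt, dif_pos]
      have hmid : (lo + hi) / 2 < t.length := by omega
      rw [List.getD_eq_getElem t default hmid]
      by_cases hb : t[(lo + hi) / 2] < c
      · simp only [hb, if_pos]
        refine ih (hi - ((lo + hi) / 2 + 1)) (by omega) _ _ rfl (by omega) hhi ?_ hup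
        intro j hj hjlt
        exact lt_of_le_of_lt (hmono j ((lo + hi) / 2) hj hmid (by omega)) hb
      · simp only [hb, if_false]
        refine ih ((lo + hi) / 2 - lo) (by omega) _ _ rfl (by omega) (by omega) hlow ?_
        intro j hj hjge hcon
        exact hb (lt_of_le_of_lt (hmono ((lo + hi) / 2) j hmid hj hjge) hcon)
    · rw [dif_neg hlt]
      have : lo = hi := by omega
      subst this
      exact ⟨by omega, hlow, hup⟩

-- Same invariant for pvBRight with the predicate (· ≤ c).
theorem pvBRight_inv (t : List Char) (c : Char) (hs : t.Pairwise (· ≤ ·)) :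
    ∀ lo hi, lo ≤ hi → hi ≤ t.length →
    (∀ j (_ : j < t.length), j < lo → t[j] ≤ c) →
    (∀ j (_ : j < t.length), hi ≤ j → ¬ t[j] ≤ c) →
    pvBRight t c lo hi ≤ t.length ∧
    (∀ j (_ : j < t.length), j < pvBRight t c lo hi → t[j] ≤ c) ∧
    (∀ j (_ : j < t.length), pvBRight t c lo hi ≤ j → ¬ t[j] ≤ c) := by
  have hmono : ∀ i j (hi : i < t.length) (hj : j < t.length), i ≤ j → t[i] ≤ t[j] := by
    intro i j hi hj hij
    rcases Nat.lt_or_ge i j with h | h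
    · exact (List.pairwise_iff_getElem.1 hs) i j hi hj h
    · have : i = j := by omega
      subst this; exact le_rfl
  intro lo hi
  induction h : hi - lo using Nat.strong_induction_on generalizing lo hi with
  | _ d ih =>
    intro hlohi hhi hlow hup
    rw [pvBRight]
    by_cases hlt : lo < hi
    · simp only [hlt, dif_pos]
      have hmid : (lo + hi) / 2 < t.length := by omega
      rw [List.getD_eq_getElem t default hmid]
      by_cases hb : c < t[(lo + hi) / 2]
      · simp only [hb, if_pos]
        refine ih ((lo + hi) / 2 - lo) (by omega) _ _ rfl (by omega) (by omega) hlow ?_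
        intro j hj hjge hcon
        exact absurd (le_trans (hmono ((lo + hi) / 2) j hmid hj hjge) hcon) (not_le.2 hb)
      · simp only [hb, if_false]
        refine ih (hi - ((lo + hi) / 2 + 1)) (by omega) _ _ rfl (by omega) hhi ?_ hup
        intro j hj hjlt
        exact le_trans (hmono j ((lo + hi) / 2) hj hmid (by omega)) (not_lt.1 hb)
    · rw [dif_neg hlt]
      have : lo = hi := by omega
      subst this
      exact ⟨by omega, hlow, hup⟩

-- A boundary index for a predicate is its countP.
theorem countP_of_boundary (p : Char → Bool) (t : List Char) (r : Nat) (hr : r ≤ t.length)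
    (h1 : ∀ j (_ : j < t.length), j < r → p t[j] = true)
    (h2 : ∀ j (_ : j < t.length), r ≤ j → ¬ p t[j] = true) :
    t.countP p = r := by
  conv_lhs => rw [← List.take_append_drop r t]
  rw [List.countP_append]
  have htake : (t.take r).countP p = (t.take r).length := by
    rw [List.countP_eq_length]
    intro a ha
    obtain ⟨j, hj, rfl⟩ := List.mem_iff_getElem.1 ha
    rw [List.getElem_take]
    exact h1 j (by simp at hj; omega) (by simp at hj; omega)
  have hdrop : (t.drop r).countP p = 0 := by
    rw [List.countP_eq_zero]
    intro a ha
    obtain ⟨j, hj, rfl⟩ := List.mem_iff_getElem.1 ha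
    rw [List.getElem_drop]
    exact h2 (r + j) (by simp at hj; omega) (by omega)
  rw [htake, hdrop, List.length_take]
  omega

-- countP (· ≤ c) splits as countP (· < c) plus the exact count.
theorem countP_le_split (c : Char) (l : List Char) :
    l.countP (fun x => decide (x ≤ c)) = l.countP (fun x => decide (x < c)) + l.count c := by
  induction l with
  | nil => simp
  | cons a tl ih =>
    rcases lt_trichotomy a c with h | h | h
    · simp [ih, le_of_lt h, h, ne_of_lt h]
      omega
    · subst h
      simp [ih]
      omega
    · simp [ih, not_le.2 h, not_lt.2 (le_of_lt h), ne_of_gt h]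

-- The two binary searches on sorted(s) compute the equal-range bounds, so their
-- difference is the count of c in s.
theorem bsearch_count (s : List Char) (c : Char) :
    (pvBRight (PySem.List.sorted s (fun x => x) false) c 0
        (PySem.List.sorted s (fun x => x) false).length : Int) -
      (pvBLeft (PySem.List.sorted s (fun x => x) false) c 0
        (PySem.List.sorted s (fun x => x) false).length : Int) = (s.count c : Int) := by
  set t := PySem.List.sorted s (fun x => x) false with ht
  have hs : t.Pairwise (· ≤ ·) := PySem.List.sorted_pairwise s (fun x => x)
  have hL := pvBLeft_inv t c hs 0 t.length (by omega) le_rfl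
    (by intro j _ h; omega) (by intro j hj h; omega)
  have hR := pvBRight_inv t c hs 0 t.length (by omega) le_rfl
    (by intro j _ h; omega) (by intro j hj h; omega)
  have hLc : t.countP (fun x => decide (x < c)) = pvBLeft t c 0 t.length := by
    refine countP_of_boundary _ t _ hL.1 ?_ ?_
    · intro j hj h; exact decide_eq_true (hL.2.1 j hj h)
    · intro j hj h hcon; exact hL.2.2 j hj h (of_decide_eq_true hcon)
  have hRc : t.countP (fun x => decide (x ≤ c)) = pvBRight t c 0 t.length := by
    refine countP_of_boundary _ t _ hR.1 ?_ ?_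
    · intro j hj h; exact decide_eq_true (hR.2.1 j hj h)
    · intro j hj h hcon; exact hR.2.2 j hj h (of_decide_eq_true hcon)
  have hcount : t.count c = s.count c := (PySem.List.sorted_perm s (fun x => x) false).count_eq c
  have := countP_le_split c t
  rw [hLc, hRc, hcount] at this
  omega

-- ===== VERDICT (by name: the statement is the Claim_ definition above) =====
theorem solution_spec : Claim_equal_solution := by
  intro s letters _
  unfold Spec_solution solution solution_alt
  simp only []
  set lc : PySem.Dict Char Int :=
    s.toList.foldl (fun d c =>
      let d1 := if d.contains c then d else d.insert c 0
      d1.insert c (d1.getD c 0 + 1)) PySem.Dict.empty with hlc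
  set t := PySem.List.sorted s.toList (fun x => x) false with ht
  -- A's output loop: one value per letter
  have hA : (letters.toList.foldl (fun result c =>
        if lc.contains c then result ++ [lc.getD c 0] else result ++ [(0 : Int)]) []) =
      letters.toList.map (fun c => lc.getD c 0) := by
    calc (letters.toList.foldl (fun result c =>
            if lc.contains c then result ++ [lc.getD c 0] else result ++ [(0 : Int)]) [])
        = letters.toList.foldl (fun r c =>
            r ++ [if lc.contains c then lc.getD c 0 else 0]) [] := by
          apply PySem.List.foldl_congr_mem
          intro r c _; split_ifs <;> rfl
      _ = letters.toList.map (fun c => if lc.contains c then lc.getD c 0 else 0) := by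
          simpa using solution_fold_append (β := Int) letters.toList []
            (fun c => if lc.contains c then lc.getD c 0 else 0)
      _ = letters.toList.map (fun c => lc.getD c 0) := by
          apply List.map_congr_left
          intro c _
          by_cases h : lc.contains c = true
          · simp [h]
          · simp [h, PySem.Dict.getD_of_not_contains]
  have hB : (letters.toList.foldl (fun result c =>
        result ++ [((pvBRight t c 0 t.length : Int) - (pvBLeft t c 0 t.length : Int))]) []) =
      letters.toList.map (fun c => ((pvBRight t c 0 t.length : Int) - (pvBLeft t c 0 t.length : Int))) := by
    simpa using solution_fold_append (β := Int) letters.toList []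
      (fun c => ((pvBRight t c 0 t.length : Int) - (pvBLeft t c 0 t.length : Int)))
  rw [hA, hB]
  apply List.map_congr_left
  intro c _
  rw [hlc, solution_fold_getD, ht, bsearch_count]
  simp
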